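-- pv_equiv track=rewrite | github.com/LyxDLiI/DiffusionVL | eval/mme_trajectory/utils_metrics.py | _stable_convergence_step
-- ===== SOURCE A (Python) =====
-- from typing import Dict, Iterable, List, Optional, Tuple
--
-- def _stable_convergence_step(step_answers: List[str], final_answer: str) -> Optional[int]:
--     if not step_answers:
--         return None
--     earliest = len(step_answers)
--     for idx in range(len(step_answers) - 1, -1, -1):
--         if step_answers[idx] == final_answer:
--             earliest = idx + 1
--         else:
--             break
--     return earliest
-- ===== SOURCE B (Python) =====
-- from typing import List, Optional
--
-- def _stable_convergence_step(step_answers: List[str], final_answer: str) -> Optional[int]: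
--     if not step_answers:
--         return None
--     if step_answers[-1] != final_answer:
--         return len(step_answers)
--     m = -1
--     for i, a in enumerate(step_answers):
--         if a != final_answer:
--             m = i
--     return m + 2
-- ===== Notes on version B (the rewrite author's own statement) =====
-- stated objective: alternative
-- what changed: Replaces A's backward scan with early break (running earliest index of the trailing run) by a trailing-element guard plus a forward no-early-break pass that records the last mismatching index and returns it + 2.
import Mathlib
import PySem

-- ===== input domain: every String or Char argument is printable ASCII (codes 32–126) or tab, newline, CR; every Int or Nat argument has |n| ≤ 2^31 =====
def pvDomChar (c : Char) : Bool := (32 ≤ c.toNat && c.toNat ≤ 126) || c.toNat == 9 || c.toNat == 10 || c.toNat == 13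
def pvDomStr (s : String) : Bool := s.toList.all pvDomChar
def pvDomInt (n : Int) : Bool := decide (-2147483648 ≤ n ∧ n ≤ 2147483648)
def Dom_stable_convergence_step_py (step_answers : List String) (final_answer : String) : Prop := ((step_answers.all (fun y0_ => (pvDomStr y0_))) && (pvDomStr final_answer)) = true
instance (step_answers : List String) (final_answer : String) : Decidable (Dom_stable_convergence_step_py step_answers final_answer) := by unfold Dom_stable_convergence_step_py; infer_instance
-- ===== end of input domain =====

-- B is an alternative decomposition (trailing-element guard + forward last-mismatch pass) of A's backward early-break scan; return values proved equal everywhere.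

-- ===== PORT A =====
-- the loop 'for idx in range(len-1, -1, -1)': k is idx+1; idx is always in range, so getD is exact
def pvLoopA (xs : List String) (fa : String) : Nat → Int → Int
  | 0, earliest => earliest
  | k + 1, earliest =>
      if xs.getD k "" = fa then pvLoopA xs fa k ((k : Int) + 1)
      else earliest

def stable_convergence_step_py (step_answers : List String) (final_answer : String) : Option Int :=
  if step_answers = [] then none
  else some (pvLoopA step_answers final_answer step_answers.length (step_answers.length : Int))

-- ===== PORT B =====
-- the 'for i, a in enumerate(step_answers)' loop, carrying the index i and last mismatch m
def pvLoopB (fa : String) : List String → Int → Int → Int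
  | [], _, m => m
  | a :: rest, i, m => pvLoopB fa rest (i + 1) (if ¬ a = fa then i else m)

def stable_convergence_step_py_alt (step_answers : List String) (final_answer : String) : Option Int :=
  if step_answers = [] then none
  else if ¬ (step_answers.getLast?.getD "" = final_answer) then some (step_answers.length : Int)
  else some (pvLoopB final_answer step_answers 0 (-1) + 2)

-- ===== PRECONDITION & SPEC =====
def Spec_stable_convergence_step_py (step_answers : List String) (final_answer : String) (out : Option Int) : Prop := out = stable_convergence_step_py_alt step_answers final_answer
instance (step_answers : List String) (final_answer : String) (out : Option Int) : Decidable (Spec_stable_convergence_step_py step_answers final_answer out) := by unfold Spec_stable_convergence_step_py; infer_instance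

-- ===== CLAIM (what is proved, stated in full; the proofs are below) =====
def Claim_equal_stable_convergence_step_py : Prop := ∀ (step_answers : List String) (final_answer : String), Dom_stable_convergence_step_py step_answers final_answer → Spec_stable_convergence_step_py step_answers final_answer (stable_convergence_step_py step_answers final_answer)

-- ===== LEMMAS AND PROOFS =====

-- last mismatching index among the first k elements (-1 if none)
def lastMism (xs : List String) (fa : String) : Nat → Int
  | 0 => -1
  | k + 1 => if xs.getD k "" = fa then lastMism xs fa k else (k : Int)

theorem pvLoopA_spec (xs : List String) (fa : String) :
    ∀ (k : Nat) (e : Int),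
      pvLoopA xs fa k e =
        if k ≠ 0 ∧ xs.getD (k - 1) "" = fa then lastMism xs fa k + 2 else e := by
  intro k
  induction k with
  | zero => intro e; simp [pvLoopA]
  | succ k ih =>
    intro e
    rw [pvLoopA]
    by_cases hk : xs.getD k "" = fa
    · rw [if_pos hk, ih,
          if_pos (show k + 1 ≠ 0 ∧ xs.getD (k + 1 - 1) "" = fa from ⟨Nat.succ_ne_zero k, hk⟩),
          show lastMism xs fa (k + 1) = lastMism xs fa k from by rw [lastMism, if_pos hk]]
      by_cases h0 : k = 0
      · subst h0
        rw [if_neg (by simp), show lastMism xs fa 0 = -1 from rfl]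
        norm_num
      · by_cases hk1 : xs.getD (k - 1) "" = fa
        · rw [if_pos ⟨h0, hk1⟩]
        · rw [if_neg (by tauto)]
          obtain ⟨k', rfl⟩ := Nat.exists_eq_succ_of_ne_zero h0
          rw [show lastMism xs fa (k' + 1) = (k' : Int) from by
                rw [lastMism, if_neg (by simpa using hk1)]]
          push_cast; ring
    · rw [if_neg hk, if_neg (fun h => hk h.2)]

theorem pvLoopB_spec (xs : List String) (fa : String) :
    ∀ (k : Nat), k ≤ xs.length →
      pvLoopB fa (xs.drop k) (k : Int) (lastMism xs fa k) = lastMism xs fa xs.length := by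
  intro k hk
  induction h : xs.length - k generalizing k with
  | zero =>
    have : k = xs.length := by omega
    subst this
    simp [pvLoopB]
  | succ n ih =>
    have hlt : k < xs.length := by omega
    have hdrop : xs.drop k = xs[k] :: xs.drop (k + 1) := List.drop_eq_getElem_cons hlt
    have hgd : xs.getD k "" = xs[k] := by
      simp [List.getD_eq_getElem?_getD, hlt]
    rw [hdrop, pvLoopB,
        show (if ¬ xs[k] = fa then (k : Int) else lastMism xs fa k) = lastMism xs fa (k + 1) from by
          rw [lastMism, hgd]
          by_cases hx : xs[k] = fa <;> simp [hx]]
    have := ih (k + 1) (by omega) (by omega)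
    push_cast at this ⊢
    exact this

theorem getLast_eq_getD (xs : List String) (h : xs ≠ []) :
    xs.getLast?.getD "" = xs.getD (xs.length - 1) "" := by
  rw [List.getLast?_eq_getElem?]
  have hlt : xs.length - 1 < xs.length := by
    have := List.length_pos_of_ne_nil h; omega
  simp [List.getD_eq_getElem?_getD]

-- ===== VERDICT (by name: the statement is the Claim_ definition above) =====
theorem stable_convergence_step_py_spec : Claim_equal_stable_convergence_step_py := by
  intro xs fa _
  unfold Spec_stable_convergence_step_py stable_convergence_step_py stable_convergence_step_py_alt
  by_cases hnil : xs = []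
  · simp [hnil]
  · rw [if_neg hnil, if_neg hnil, pvLoopA_spec, getLast_eq_getD xs hnil]
    have hn : xs.length ≠ 0 := fun h => hnil (List.eq_nil_of_length_eq_zero h)
    by_cases hlast : xs.getD (xs.length - 1) "" = fa
    · have hlast' : xs[xs.length - 1]?.getD "" = fa := by
        rwa [List.getD_eq_getElem?_getD] at hlast
      rw [if_pos ⟨hn, hlast⟩, if_neg (by simp [hlast'])]
      have hB := pvLoopB_spec xs fa 0 (Nat.zero_le _)
      simp only [List.drop_zero, Nat.cast_zero] at hB
      rw [show lastMism xs fa 0 = -1 from rfl] at hB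
      rw [hB]
    · have hlast' : ¬ xs[xs.length - 1]?.getD "" = fa := by
        rwa [List.getD_eq_getElem?_getD] at hlast
      rw [if_neg (fun h => hlast h.2), if_pos (by simp [hlast'])]
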